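-- pv_equiv track=rewrite | github.com/jrodriguezgar/FormuLite | shortfx/fxString/string_operations.py | text_after
-- ===== SOURCE A (Python) =====
-- def text_after(
--     text: str, delimiter: str, instance_num: int = 1
-- ) -> str:
--     """Returns text that occurs after a given delimiter.
--
--     Description:
--         Returns the portion of text after the Nth occurrence of the
--         delimiter. Negative instance_num searches from the end.
--         Equivalent to Excel TEXTAFTER.
--
--     Args:
--         text: The input text to search.
--         delimiter: The delimiter to search for.
--         instance_num: Which occurrence (1 = first, -1 = last, etc.).
--
--     Returns:
--         The text after the specified occurrence of the delimiter.
--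
--     Raises:
--         TypeError: If text or delimiter are not strings.
--         ValueError: If instance_num is 0 or delimiter is not found.
--
--     Example:
--         >>> text_after("hello-world-test", "-")
--         'world-test'
--         >>> text_after("hello-world-test", "-", 2)
--         'test'
--         >>> text_after("hello-world-test", "-", -1)
--         'test'
--
--     Complexity: O(n)
--     """
--     if not isinstance(text, str) or not isinstance(delimiter, str):
--         raise TypeError("text and delimiter must be strings.")
--
--     if instance_num == 0:
--         raise ValueError("instance_num cannot be 0.")
--
--     if instance_num > 0:
--         count = 0
--         start = 0
--
--         while True:
--             pos = text.find(delimiter, start)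
--
--             if pos == -1:
--                 break
--
--             count += 1
--
--             if count == instance_num:
--                 return text[pos + len(delimiter):]
--
--             start = pos + len(delimiter)
--
--         raise ValueError(f"Delimiter '{delimiter}' not found {instance_num} time(s).")
--
--     # Negative: search from end
--     count = 0
--     end = len(text)
--
--     while True:
--         pos = text.rfind(delimiter, 0, end)
--
--         if pos == -1:
--             break
--
--         count += 1
--
--         if count == abs(instance_num):
--             return text[pos + len(delimiter):]
--
--         end = pos
--
--     raise ValueError(f"Delimiter '{delimiter}' not found {abs(instance_num)} time(s) from end.")
-- ===== SOURCE B (Python) =====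
-- def text_after(text, delimiter, instance_num=1):
--     """Split-based TEXTAFTER: positive N drops the first N split parts; negative N
--     works on the reversed string so the scan from the end matches rfind's greedy order."""
--     if not isinstance(text, str) or not isinstance(delimiter, str):
--         raise TypeError("text and delimiter must be strings.")
--     if instance_num == 0:
--         raise ValueError("instance_num cannot be 0.")
--     if delimiter == "":
--         # '' matches at the current position, so the original scan never advances:
--         # it yields the whole text for positive N and the empty tail for negative N.
--         return text if instance_num > 0 else ""
--     if instance_num > 0:
--         parts = text.split(delimiter)
--         if instance_num > len(parts) - 1:
--             raise ValueError(f"Delimiter '{delimiter}' not found {instance_num} time(s).")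
--         return delimiter.join(parts[instance_num:])
--     rev = text[::-1]
--     rdelim = delimiter[::-1]
--     parts = rev.split(rdelim)
--     k = -instance_num
--     if k > len(parts) - 1:
--         raise ValueError(f"Delimiter '{delimiter}' not found {k} time(s) from end.")
--     return rdelim.join(parts[:k])[::-1]
-- ===== Notes on version B (the rewrite author's own statement) =====
-- stated objective: idiomatic
-- what changed: A's hand-rolled find/rfind counting loops are replaced by one str.split plus a join of the kept parts (done on the reversed string for negative instance_num so the right-to-left greedy scan is preserved), with an explicit empty-delimiter branch.
import Mathlib
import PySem

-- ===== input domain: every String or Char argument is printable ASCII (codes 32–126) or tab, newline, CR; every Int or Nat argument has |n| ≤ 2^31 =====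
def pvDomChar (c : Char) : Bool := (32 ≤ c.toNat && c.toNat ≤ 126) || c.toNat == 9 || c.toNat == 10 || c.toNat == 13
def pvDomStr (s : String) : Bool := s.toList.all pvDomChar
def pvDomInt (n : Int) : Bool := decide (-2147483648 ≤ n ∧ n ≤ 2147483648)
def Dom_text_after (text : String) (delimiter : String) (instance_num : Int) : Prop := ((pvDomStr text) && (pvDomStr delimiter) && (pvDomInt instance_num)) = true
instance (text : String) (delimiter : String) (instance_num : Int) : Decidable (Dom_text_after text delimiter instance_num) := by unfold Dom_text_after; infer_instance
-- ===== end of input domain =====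

-- B re-implements A's two hand-rolled find/rfind scanning loops with split/join (on the
-- reversed string for negative instance_num) — idiomatic, same return value wherever A returns.

-- ===== PORT A =====
-- positive while-loop; fuel = instance_num - count (count increments once per pass,
-- Python returns when count == instance_num, i.e. when fuel reaches 1)
def taPosLoop (cs ds : List Char) : Nat → Int → List Char
  | 0, _ => []          -- unreachable: instance_num ≥ 1, the loop returns at fuel 1
  | fuel + 1, start =>
    let pos := PySem.Chars.findFrom cs ds start
    if pos = -1 then []  -- raise ValueError(...): excluded by Pre_
    else if fuel = 0 then PySem.Chars.slice cs (some (pos + (ds.length : Int))) none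
    else taPosLoop cs ds fuel (pos + (ds.length : Int))

-- negative while-loop; fuel = abs(instance_num) - count
def taNegLoop (cs ds : List Char) : Nat → Int → List Char
  | 0, _ => []          -- unreachable
  | fuel + 1, e =>
    let pos := PySem.Chars.rfindFrom cs ds 0 (some e)
    if pos = -1 then []  -- raise ValueError(...): excluded by Pre_
    else if fuel = 0 then PySem.Chars.slice cs (some (pos + (ds.length : Int))) none
    else taNegLoop cs ds fuel pos

def text_after (text : String) (delimiter : String) (instance_num : Int) : String :=
  -- the isinstance TypeError guard is enforced by the Lean types
  if instance_num = 0 then ""      -- raise ValueError: excluded by Pre_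
  else if 0 < instance_num then
    String.ofList (taPosLoop text.toList delimiter.toList instance_num.toNat 0)
  else
    String.ofList (taNegLoop text.toList delimiter.toList instance_num.natAbs (text.toList.length : Int))

-- ===== PORT B =====
def text_after_alt (text : String) (delimiter : String) (instance_num : Int) : String :=
  if instance_num = 0 then ""      -- raise ValueError: excluded by Pre_
  else if delimiter = "" then (if 0 < instance_num then text else "")
  else if 0 < instance_num then
    match PySem.Str.split? text delimiter with
    | none => ""                   -- unreachable: delimiter ≠ ""
    | some parts =>
      if (parts.length : Int) - 1 < instance_num then ""  -- raise ValueError: excluded by Pre_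
      else PySem.Str.join delimiter (PySem.List.slice parts (some instance_num) none)
  else
    -- rev = text[::-1], rdelim = delimiter[::-1]  (exact: PySem.Str.slice?_none_none_neg_one)
    let rev := String.ofList text.toList.reverse
    let rdelim := String.ofList delimiter.toList.reverse
    match PySem.Str.split? rev rdelim with
    | none => ""                   -- unreachable: rdelim ≠ ""
    | some parts =>
      let k : Int := -instance_num
      if (parts.length : Int) - 1 < k then ""             -- raise ValueError: excluded by Pre_
      else String.ofList (PySem.Str.join rdelim (PySem.List.slice parts none (some k))).toList.reverse

-- ===== PRECONDITION & SPEC =====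
-- Pre_ excludes exactly the inputs where the Python A raises ValueError: instance_num = 0,
-- and a non-empty delimiter occurring fewer than |instance_num| times in A's greedy scan
-- (left-to-right for positive instance_num, right-to-left — i.e. left-to-right on the
-- reversed string — for negative), stated as "enough split parts".
def Pre_text_after (text : String) (delimiter : String) (instance_num : Int) : Prop :=
  instance_num ≠ 0 ∧ (delimiter = "" ∨
    (if 0 < instance_num
     then instance_num ≤ ((PySem.Chars.splitOn text.toList delimiter.toList).length : Int) - 1
     else -instance_num ≤ ((PySem.Chars.splitOn text.toList.reverse delimiter.toList.reverse).length : Int) - 1))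
instance (text : String) (delimiter : String) (instance_num : Int) : Decidable (Pre_text_after text delimiter instance_num) := by unfold Pre_text_after; infer_instance

def pvWitness_text_after : String × String × Int := ("hello-world-test", "-", 2)

def Spec_text_after (text : String) (delimiter : String) (instance_num : Int) (out : String) : Prop := out = text_after_alt text delimiter instance_num
instance (text : String) (delimiter : String) (instance_num : Int) (out : String) : Decidable (Spec_text_after text delimiter instance_num out) := by unfold Spec_text_after; infer_instance

-- ===== CLAIM (what is proved, stated in full; the proofs are below) =====
def Claim_equal_text_after : Prop := ∀ (text : String) (delimiter : String) (instance_num : Int), Dom_text_after text delimiter instance_num → Pre_text_after text delimiter instance_num → Spec_text_after text delimiter instance_num (text_after text delimiter instance_num)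

-- ===== LEMMAS AND PROOFS =====

-- specification-side split: repeated leftmost find, with fuel for termination
def splitFGo (ds : List Char) : Nat → List Char → List (List Char)
  | 0, t => [t]
  | fuel + 1, t =>
    let p := PySem.Chars.find t ds
    if p = -1 then [t]
    else t.take p.toNat :: splitFGo ds fuel (t.drop (p.toNat + ds.length))

def splitF (ds t : List Char) : List (List Char) := splitFGo ds t.length t

lemma find_nonneg_of_ne {t ds : List Char} (h : PySem.Chars.find t ds ≠ -1) :
    0 ≤ PySem.Chars.find t ds := by
  rw [PySem.Chars.find_nonneg_iff]
  exact (PySem.Chars.find_ne_neg_one_iff t ds).mp h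

lemma find_add_len_le {t ds : List Char} (h : PySem.Chars.find t ds ≠ -1) :
    (PySem.Chars.find t ds).toNat + ds.length ≤ t.length := by
  obtain ⟨hpre, -⟩ := PySem.Chars.find_spec (find_nonneg_of_ne h)
  have h1 := hpre.length_le
  have h2 : (PySem.Chars.find t ds).toNat ≤ t.length := by
    have := PySem.Chars.find_le_length t ds
    omega
  simp only [List.length_drop] at h1
  omega

lemma drop_find_eq {t ds : List Char} (h : PySem.Chars.find t ds ≠ -1) :
    t.drop (PySem.Chars.find t ds).toNat =
      ds ++ t.drop ((PySem.Chars.find t ds).toNat + ds.length) := by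
  obtain ⟨hpre, -⟩ := PySem.Chars.find_spec (find_nonneg_of_ne h)
  obtain ⟨r, hr⟩ := hpre
  rw [← hr]
  congr 1
  have : t.drop ((PySem.Chars.find t ds).toNat + ds.length)
      = (t.drop (PySem.Chars.find t ds).toNat).drop ds.length := by
    rw [List.drop_drop, Nat.add_comm]
  rw [this, ← hr, List.drop_left]

lemma find_nil_of_ne {ds : List Char} (hds : ds ≠ []) : PySem.Chars.find [] ds = -1 := by
  rw [PySem.Chars.find_eq_neg_one_iff]
  simp [hds]

lemma splitFGo_fuel {ds : List Char} (hds : ds ≠ []) :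
    ∀ fuel fuel' t, t.length ≤ fuel → t.length ≤ fuel' →
      splitFGo ds fuel t = splitFGo ds fuel' t := by
  have hm : 0 < ds.length := List.length_pos_of_ne_nil hds
  intro fuel
  induction fuel with
  | zero =>
    intro fuel' t ht ht'
    have h0 : t = [] := List.eq_nil_of_length_eq_zero (by omega)
    subst h0
    cases fuel' with
    | zero => rfl
    | succ k => simp [splitFGo, find_nil_of_ne hds]
  | succ f ih =>
    intro fuel' t ht ht'
    cases fuel' with
    | zero =>
      have h0 : t = [] := List.eq_nil_of_length_eq_zero (by omega)
      subst h0
      simp [splitFGo, find_nil_of_ne hds]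
    | succ f' =>
      simp only [splitFGo]
      split
      · rfl
      · rename_i hp
        congr 1
        apply ih
        · simp only [List.length_drop]
          have := find_add_len_le hp
          omega
        · simp only [List.length_drop]
          have := find_add_len_le hp
          omega

lemma splitF_eq {ds : List Char} (hds : ds ≠ []) (t : List Char) :
    splitF ds t =
      if PySem.Chars.find t ds = -1 then [t]
      else t.take (PySem.Chars.find t ds).toNat ::
        splitF ds (t.drop ((PySem.Chars.find t ds).toNat + ds.length)) := by
  have hm : 0 < ds.length := List.length_pos_of_ne_nil hds
  cases h : t.length with
  | zero =>
    have h0 : t = [] := List.eq_nil_of_length_eq_zero h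
    subst h0
    unfold splitF
    simp [splitFGo, find_nil_of_ne hds]
  | succ k =>
    conv_lhs => rw [splitF, h]
    simp only [splitFGo]
    split
    · rfl
    · rename_i hp
      congr 1
      apply splitFGo_fuel hds
      · simp only [List.length_drop]
        have := find_add_len_le hp
        omega
      · rfl

lemma splitF_ne_nil (ds t : List Char) : splitF ds t ≠ [] := by
  unfold splitF
  cases h : t.length with
  | zero => simp [splitFGo]
  | succ k =>
    simp only [splitFGo]
    split <;> simp

lemma join_splitF {ds : List Char} (hds : ds ≠ []) :
    ∀ n t, t.length ≤ n → PySem.Chars.join ds (splitF ds t) = t := by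
  have hm : 0 < ds.length := List.length_pos_of_ne_nil hds
  intro n
  induction n with
  | zero =>
    intro t ht
    have h0 : t = [] := List.eq_nil_of_length_eq_zero (by omega)
    subst h0
    rw [splitF_eq hds]
    simp [find_nil_of_ne hds, PySem.Chars.join_singleton]
  | succ n ih =>
    intro t ht
    rw [splitF_eq hds t]
    split
    · exact PySem.Chars.join_singleton _ _
    · rename_i hp
      cases h' : splitF ds (t.drop ((PySem.Chars.find t ds).toNat + ds.length)) with
      | nil => exact absurd h' (splitF_ne_nil _ _)
      | cons a r =>
        rw [PySem.Chars.join_cons_cons, ← h']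
        have hlen := find_add_len_le hp
        have hr : PySem.Chars.join ds
            (splitF ds (t.drop ((PySem.Chars.find t ds).toNat + ds.length))) =
            t.drop ((PySem.Chars.find t ds).toNat + ds.length) := by
          apply ih
          simp only [List.length_drop]
          omega
        rw [hr]
        conv_rhs => rw [← List.take_append_drop (PySem.Chars.find t ds).toNat t,
          drop_find_eq hp]
        simp [List.append_assoc]

lemma taPosLoop_succ (cs ds : List Char) (fuel : Nat) (start : Int) :
    taPosLoop cs ds (fuel + 1) start =
      if PySem.Chars.findFrom cs ds start = -1 then []
      else if fuel = 0 then
        PySem.Chars.slice cs (some (PySem.Chars.findFrom cs ds start + (ds.length : Int))) none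
      else taPosLoop cs ds fuel (PySem.Chars.findFrom cs ds start + (ds.length : Int)) := rfl

lemma taNegLoop_succ (cs ds : List Char) (fuel : Nat) (e : Int) :
    taNegLoop cs ds (fuel + 1) e =
      if PySem.Chars.rfindFrom cs ds 0 (some e) = -1 then []
      else if fuel = 0 then
        PySem.Chars.slice cs (some (PySem.Chars.rfindFrom cs ds 0 (some e) + (ds.length : Int))) none
      else taNegLoop cs ds fuel (PySem.Chars.rfindFrom cs ds 0 (some e)) := rfl

-- A's positive loop computes "join of the parts after the (fuel+1)-th occurrence"
lemma taPosLoop_eq {cs ds : List Char} (hds : ds ≠ []) :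
    ∀ fuel (s : Int), 0 ≤ s → s.toNat ≤ cs.length →
      taPosLoop cs ds (fuel + 1) s =
        if fuel + 2 ≤ (splitF ds (cs.drop s.toNat)).length
        then PySem.Chars.join ds ((splitF ds (cs.drop s.toNat)).drop (fuel + 1))
        else [] := by
  have hm : 0 < ds.length := List.length_pos_of_ne_nil hds
  intro fuel
  induction fuel with
  | zero =>
    intro s hs hsl
    have hcast : s = ((s.toNat : Nat) : Int) := (Int.toNat_of_nonneg hs).symm
    have hfa := PySem.Chars.findFrom_natCast cs ds s.toNat hsl
    rw [taPosLoop_succ]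
    conv_lhs => rw [hcast]
    rw [hfa]
    by_cases hp : PySem.Chars.find (cs.drop s.toNat) ds = -1
    · rw [if_pos hp, if_pos rfl]
      rw [splitF_eq hds, if_pos hp]
      simp
    · have hp0 : 0 ≤ PySem.Chars.find (cs.drop s.toNat) ds := find_nonneg_of_ne hp
      have hlen := find_add_len_le hp
      simp only [List.length_drop] at hlen
      rw [if_neg hp]
      rw [if_neg (by omega :
        ¬ (((s.toNat : Nat) : Int) + PySem.Chars.find (cs.drop s.toNat) ds = -1))]
      rw [if_pos rfl]
      rw [PySem.Chars.slice_eq_listSlice, PySem.List.slice_from _ (by omega)]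
      have htn : ((((s.toNat : Nat) : Int) + PySem.Chars.find (cs.drop s.toNat) ds) +
          ((ds.length : Nat) : Int)).toNat
          = s.toNat + ((PySem.Chars.find (cs.drop s.toNat) ds).toNat + ds.length) := by
        omega
      rw [htn, ← List.drop_drop]
      rw [splitF_eq hds (cs.drop s.toNat), if_neg hp]
      have hne := splitF_ne_nil ds
        ((cs.drop s.toNat).drop ((PySem.Chars.find (cs.drop s.toNat) ds).toNat + ds.length))
      have hpos := List.length_pos_of_ne_nil hne
      rw [if_pos (by simp only [List.length_cons]; omega)]
      rw [List.drop_succ_cons, List.drop_zero]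
      rw [join_splitF hds _ _ (le_refl _)]
  | succ g ih =>
    intro s hs hsl
    have hcast : s = ((s.toNat : Nat) : Int) := (Int.toNat_of_nonneg hs).symm
    have hfa := PySem.Chars.findFrom_natCast cs ds s.toNat hsl
    rw [taPosLoop_succ]
    conv_lhs => rw [hcast]
    rw [hfa]
    by_cases hp : PySem.Chars.find (cs.drop s.toNat) ds = -1
    · rw [if_pos hp]
      rw [splitF_eq hds, if_pos hp]
      simp
    · have hp0 : 0 ≤ PySem.Chars.find (cs.drop s.toNat) ds := find_nonneg_of_ne hp
      have hlen := find_add_len_le hp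
      simp only [List.length_drop] at hlen
      rw [if_neg hp]
      rw [if_neg (by omega :
        ¬ (((s.toNat : Nat) : Int) + PySem.Chars.find (cs.drop s.toNat) ds = -1))]
      rw [if_neg (Nat.succ_ne_zero g)]
      have harg : 0 ≤ (((s.toNat : Nat) : Int) + PySem.Chars.find (cs.drop s.toNat) ds) +
          ((ds.length : Nat) : Int) := by omega
      have hargl : ((((s.toNat : Nat) : Int) + PySem.Chars.find (cs.drop s.toNat) ds) +
          ((ds.length : Nat) : Int)).toNat ≤ cs.length := by omega
      rw [ih _ harg hargl]
      have htn : ((((s.toNat : Nat) : Int) + PySem.Chars.find (cs.drop s.toNat) ds) +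
          ((ds.length : Nat) : Int)).toNat
          = s.toNat + ((PySem.Chars.find (cs.drop s.toNat) ds).toNat + ds.length) := by
        omega
      rw [htn, ← List.drop_drop]
      conv_rhs => rw [splitF_eq hds (cs.drop s.toNat), if_neg hp]
      have hne := splitF_ne_nil ds
        ((cs.drop s.toNat).drop ((PySem.Chars.find (cs.drop s.toNat) ds).toNat + ds.length))
      have hpos := List.length_pos_of_ne_nil hne
      simp only [List.length_cons]
      by_cases hc : g + 1 + 2 ≤ (splitF ds ((cs.drop s.toNat).drop
          ((PySem.Chars.find (cs.drop s.toNat) ds).toNat + ds.length))).length + 1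
      · rw [if_pos (by omega), if_pos hc]
        rw [List.drop_succ_cons]
      · rw [if_neg (by omega), if_neg hc]

-- rfind.go returns the largest occurrence position ≤ k, else -1
lemma rgo_cases (u ds : List Char) :
    ∀ k, (PySem.Chars.rfind.go u ds k = -1 ∧ ∀ j ≤ k, ¬ ds <+: u.drop j)
      ∨ (∃ r : Nat, r ≤ k ∧ PySem.Chars.rfind.go u ds k = (r : Int) ∧ ds <+: u.drop r ∧
          ∀ j, r < j → j ≤ k → ¬ ds <+: u.drop j) := by
  intro k
  induction k with
  | zero =>
    by_cases h : ds.isPrefixOf u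
    · right
      refine ⟨0, le_refl 0, by simp [PySem.Chars.rfind.go, h], ?_, ?_⟩
      · simpa [List.isPrefixOf_iff_prefix] using h
      · intro j h1 h2; omega
    · left
      refine ⟨by simp [PySem.Chars.rfind.go, h], ?_⟩
      intro j hj
      have hj0 : j = 0 := Nat.le_zero.mp hj
      subst hj0
      simpa [List.isPrefixOf_iff_prefix] using h
  | succ k ih =>
    by_cases h : ds.isPrefixOf (u.drop (k + 1))
    · right
      exact ⟨k + 1, le_refl _, by simp [PySem.Chars.rfind.go, h],
        List.isPrefixOf_iff_prefix.mp h, by intro j h1 h2; omega⟩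
    · have hnp : ¬ ds <+: u.drop (k + 1) := fun hh => h (List.isPrefixOf_iff_prefix.mpr hh)
      rcases ih with ⟨he, hall⟩ | ⟨r, hr, he, hpre, hmax⟩
      · left
        refine ⟨by simp [PySem.Chars.rfind.go, h, he], ?_⟩
        intro j hj
        rcases Nat.lt_or_ge j (k + 1) with h1 | h1
        · exact hall j (by omega)
        · have hj1 : j = k + 1 := by omega
          subst hj1; exact hnp
      · right
        refine ⟨r, by omega, by simp [PySem.Chars.rfind.go, h, he], hpre, ?_⟩
        intro j h1 h2
        rcases Nat.lt_or_ge j (k + 1) with h3 | h3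
        · exact hmax j h1 (by omega)
        · have hj1 : j = k + 1 := by omega
          subst hj1; exact hnp

lemma occ_reverse {u ds : List Char} {j : Nat} (hj : j + ds.length ≤ u.length)
    (h : ds <+: u.drop j) :
    ds.reverse <+: u.reverse.drop (u.length - j - ds.length) := by
  obtain ⟨w, hw⟩ := h
  have hwlen : w.reverse.length = u.length - j - ds.length := by
    have h1 := congrArg List.length hw
    simp only [List.length_append, List.length_drop] at h1
    simp only [List.length_reverse]
    omega
  have hu : u.reverse = w.reverse ++ (ds.reverse ++ (u.take j).reverse) := by
    conv_lhs => rw [← List.take_append_drop j u, ← hw]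
    simp [List.reverse_append, List.append_assoc]
  rw [hu, List.drop_left' hwlen]
  exact ⟨(u.take j).reverse, rfl⟩

lemma rfind_rev {ds : List Char} (hds : ds ≠ []) (u : List Char) :
    PySem.Chars.rfind u ds =
      if PySem.Chars.find u.reverse ds.reverse = -1 then -1
      else (u.length : Int) - ds.length - PySem.Chars.find u.reverse ds.reverse := by
  have hm : 0 < ds.length := List.length_pos_of_ne_nil hds
  have hgo : PySem.Chars.rfind u ds = PySem.Chars.rfind.go u ds u.length := rfl
  by_cases hf : PySem.Chars.find u.reverse ds.reverse = -1
  · rw [if_pos hf]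
    rcases rgo_cases u ds u.length with ⟨he, -⟩ | ⟨r, hr, he, hpre, -⟩
    · rw [hgo, he]
    · exfalso
      have hinf : ds.reverse <:+: u.reverse := by
        rw [List.reverse_infix]
        obtain ⟨w, hw⟩ := hpre
        exact ⟨u.take r, w, by rw [List.append_assoc, hw, List.take_append_drop]⟩
      exact (PySem.Chars.find_ne_neg_one_iff _ _).mpr hinf hf
  · rw [if_neg hf]
    have hf0 : 0 ≤ PySem.Chars.find u.reverse ds.reverse := find_nonneg_of_ne hf
    have hflen : (PySem.Chars.find u.reverse ds.reverse).toNat + ds.length ≤ u.length := by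
      have h1 := find_add_len_le hf
      simpa [List.length_reverse] using h1
    obtain ⟨hfpre, hfmin⟩ := PySem.Chars.find_spec hf0
    have hocc : ds <+: u.drop
        (u.length - (PySem.Chars.find u.reverse ds.reverse).toNat - ds.length) := by
      have h1 := occ_reverse (u := u.reverse) (ds := ds.reverse)
        (j := (PySem.Chars.find u.reverse ds.reverse).toNat)
        (by simpa [List.length_reverse] using hflen) hfpre
      simpa [List.reverse_reverse, List.length_reverse] using h1
    rcases rgo_cases u ds u.length with ⟨-, hall⟩ | ⟨r, hr, he, hpre, hmax⟩
    · exact absurd hocc (hall _ (by omega))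
    · rw [hgo, he]
      have hrm : r + ds.length ≤ u.length := by
        obtain ⟨w, hw⟩ := hpre
        have h1 := congrArg List.length hw
        simp only [List.length_append, List.length_drop] at h1
        omega
      have hge : u.length - (PySem.Chars.find u.reverse ds.reverse).toNat - ds.length ≤ r := by
        by_contra hlt
        exact hmax _ (by omega) (by omega) hocc
      have hle : r ≤ u.length - (PySem.Chars.find u.reverse ds.reverse).toNat - ds.length := by
        by_contra hlt
        have h2 : ds.reverse <+: u.reverse.drop (u.length - r - ds.length) :=
          occ_reverse hrm hpre
        exact hfmin (u.length - r - ds.length) (by omega) h2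
      have hfi : ((PySem.Chars.find u.reverse ds.reverse).toNat : Int)
          = PySem.Chars.find u.reverse ds.reverse := Int.toNat_of_nonneg hf0
      omega

lemma rfind_nil (u : List Char) : PySem.Chars.rfind u [] = (u.length : Int) := by
  have hgo : PySem.Chars.rfind u [] = PySem.Chars.rfind.go u [] u.length := rfl
  rw [hgo]
  cases h : u.length with
  | zero => simp [PySem.Chars.rfind.go]
  | succ k => simp [PySem.Chars.rfind.go]

lemma rfindFrom_zero_some {cs ds : List Char} {e : Int} (h0 : 0 ≤ e)
    (hl : e ≤ (cs.length : Int)) :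
    PySem.Chars.rfindFrom cs ds 0 (some e) = PySem.Chars.rfind (cs.take e.toNat) ds := by
  simp only [PySem.Chars.rfindFrom]
  rw [if_neg (not_lt.mpr hl), if_neg (not_lt.mpr h0), if_neg (lt_irrefl (0 : Int)),
    if_neg (not_lt.mpr h0)]
  simp only [Int.toNat_zero, List.drop_zero]
  split
  · rename_i hr; exact hr.symm
  · rw [zero_add]

-- A's negative loop computes "reverse of join of the first (fuel+1) parts of the reversed split"
lemma taNegLoop_eq {cs ds : List Char} (hds : ds ≠ []) :
    ∀ fuel (s : Nat), s ≤ cs.length →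
      taNegLoop cs ds (fuel + 1) ((cs.length : Int) - s) =
        if fuel + 2 ≤ (splitF ds.reverse (cs.reverse.drop s)).length
        then (cs.reverse.take s ++
          PySem.Chars.join ds.reverse ((splitF ds.reverse (cs.reverse.drop s)).take (fuel + 1))).reverse
        else [] := by
  have hm : 0 < ds.length := List.length_pos_of_ne_nil hds
  have hdr : ds.reverse ≠ [] := by simp [hds]
  have hdl : ds.reverse.length = ds.length := List.length_reverse
  intro fuel
  induction fuel with
  | zero =>
    intro s hs
    have h0e : (0 : Int) ≤ (cs.length : Int) - s := by omega
    have hle : (cs.length : Int) - s ≤ (cs.length : Int) := by omega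
    rw [taNegLoop_succ, rfindFrom_zero_some h0e hle]
    have het : ((cs.length : Int) - s).toNat = cs.length - s := by omega
    rw [het, rfind_rev hds]
    have hur : (cs.take (cs.length - s)).reverse = cs.reverse.drop s := by
      rw [List.reverse_take]
      congr 1
      omega
    have hul : (cs.take (cs.length - s)).length = cs.length - s := by
      simp
    rw [hur, hul]
    by_cases hp : PySem.Chars.find (cs.reverse.drop s) ds.reverse = -1
    · rw [if_pos hp, if_pos rfl]
      rw [splitF_eq hdr, if_pos hp]
      simp
    · have hp0 : 0 ≤ PySem.Chars.find (cs.reverse.drop s) ds.reverse := find_nonneg_of_ne hp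
      have hlen := find_add_len_le hp
      simp only [List.length_reverse, List.length_drop] at hlen
      rw [if_neg hp]
      have hnn : ¬ (((cs.length - s : Nat) : Int) - ds.length -
          PySem.Chars.find (cs.reverse.drop s) ds.reverse = -1) := by omega
      rw [if_neg hnn, if_pos rfl]
      rw [PySem.Chars.slice_eq_listSlice, PySem.List.slice_from _ (by omega)]
      have htn : (((cs.length - s : Nat) : Int) - ds.length -
          PySem.Chars.find (cs.reverse.drop s) ds.reverse + ((ds.length : Nat) : Int)).toNat
          = cs.length - (s + (PySem.Chars.find (cs.reverse.drop s) ds.reverse).toNat) := by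
        omega
      rw [htn]
      rw [splitF_eq hdr, if_neg hp]
      have hne := splitF_ne_nil ds.reverse ((cs.reverse.drop s).drop
        ((PySem.Chars.find (cs.reverse.drop s) ds.reverse).toNat + ds.reverse.length))
      have hposx := List.length_pos_of_ne_nil hne
      rw [if_pos (by simp only [List.length_cons]; omega)]
      rw [List.take_succ_cons, List.take_zero, PySem.Chars.join_singleton]
      rw [← List.take_add, List.reverse_take, List.reverse_reverse]
      congr 1
      simp
  | succ g ih =>
    intro s hs
    have h0e : (0 : Int) ≤ (cs.length : Int) - s := by omega
    have hle : (cs.length : Int) - s ≤ (cs.length : Int) := by omega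
    rw [taNegLoop_succ, rfindFrom_zero_some h0e hle]
    have het : ((cs.length : Int) - s).toNat = cs.length - s := by omega
    rw [het, rfind_rev hds]
    have hur : (cs.take (cs.length - s)).reverse = cs.reverse.drop s := by
      rw [List.reverse_take]
      congr 1
      omega
    have hul : (cs.take (cs.length - s)).length = cs.length - s := by
      simp
    rw [hur, hul]
    by_cases hp : PySem.Chars.find (cs.reverse.drop s) ds.reverse = -1
    · rw [if_pos hp, if_pos rfl]
      rw [splitF_eq hdr, if_pos hp]
      simp
    · have hp0 : 0 ≤ PySem.Chars.find (cs.reverse.drop s) ds.reverse := find_nonneg_of_ne hp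
      have hlen := find_add_len_le hp
      simp only [List.length_reverse, List.length_drop] at hlen
      rw [if_neg hp]
      have hnn : ¬ (((cs.length - s : Nat) : Int) - ds.length -
          PySem.Chars.find (cs.reverse.drop s) ds.reverse = -1) := by omega
      rw [if_neg hnn, if_neg (Nat.succ_ne_zero g)]
      have harg : ((cs.length - s : Nat) : Int) - ds.length -
          PySem.Chars.find (cs.reverse.drop s) ds.reverse
          = (cs.length : Int) - ((s + ((PySem.Chars.find (cs.reverse.drop s) ds.reverse).toNat
            + ds.reverse.length) : Nat) : Int) := by
        push_cast [hdl]
        omega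
      rw [harg, ih _ (by omega)]
      have hdd : cs.reverse.drop (s + ((PySem.Chars.find (cs.reverse.drop s) ds.reverse).toNat
          + ds.reverse.length)) = (cs.reverse.drop s).drop
            ((PySem.Chars.find (cs.reverse.drop s) ds.reverse).toNat + ds.reverse.length) := by
        rw [List.drop_drop]
      rw [hdd]
      rw [splitF_eq hdr (cs.reverse.drop s), if_neg hp]
      have hne := splitF_ne_nil ds.reverse ((cs.reverse.drop s).drop
        ((PySem.Chars.find (cs.reverse.drop s) ds.reverse).toNat + ds.reverse.length))
      have hposx := List.length_pos_of_ne_nil hne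
      by_cases hc : g + 2 ≤ (splitF ds.reverse ((cs.reverse.drop s).drop
          ((PySem.Chars.find (cs.reverse.drop s) ds.reverse).toNat + ds.reverse.length))).length
      · rw [if_pos hc, if_pos (by simp only [List.length_cons]; omega)]
        congr 1
        rw [List.take_succ_cons]
        cases hsp : splitF ds.reverse ((cs.reverse.drop s).drop
            ((PySem.Chars.find (cs.reverse.drop s) ds.reverse).toNat + ds.reverse.length)) with
        | nil => exact absurd hsp (splitF_ne_nil _ _)
        | cons a r =>
          rw [List.take_succ_cons, PySem.Chars.join_cons_cons]
          rw [List.take_add, List.take_add]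
          rw [drop_find_eq hp, List.take_left' rfl]
          simp [List.append_assoc]
      · rw [if_neg hc, if_neg (by simp only [List.length_cons]; omega)]

-- find.go at offset k = find + k
lemma fgo_shift {ds : List Char} (hds : ds ≠ []) :
    ∀ l k, PySem.Chars.find.go ds l k =
      if PySem.Chars.find l ds = -1 then -1 else PySem.Chars.find l ds + k := by
  intro l
  induction l with
  | nil =>
    intro k
    have hne : ds.isEmpty = false := by simp [hds]
    simp [PySem.Chars.find.go, hne, find_nil_of_ne hds]
  | cons c t ih =>
    intro k
    by_cases h : ds.isPrefixOf (c :: t)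
    · have hf : PySem.Chars.find (c :: t) ds = 0 := by
        have h0 : PySem.Chars.find (c :: t) ds = PySem.Chars.find.go ds (c :: t) 0 := rfl
        rw [h0]; simp [PySem.Chars.find.go, h]
      simp [PySem.Chars.find.go, h, hf]
    · have hstep : ∀ j : Nat, PySem.Chars.find.go ds (c :: t) j = PySem.Chars.find.go ds t (j + 1) := by
        intro j; simp [PySem.Chars.find.go, h]
      have hf : PySem.Chars.find (c :: t) ds = PySem.Chars.find.go ds t 1 := by
        have h0 : PySem.Chars.find (c :: t) ds = PySem.Chars.find.go ds (c :: t) 0 := rfl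
        rw [h0, hstep 0]
      rw [hstep k, ih (k + 1), hf, ih 1]
      by_cases hft : PySem.Chars.find t ds = -1
      · simp [hft]
      · have h0 : 0 ≤ PySem.Chars.find t ds := find_nonneg_of_ne hft
        simp only [if_neg hft]
        rw [if_neg (by push_cast; omega :
          ¬ (PySem.Chars.find t ds + ((1 : Nat) : Int) = -1))]
        push_cast
        omega

lemma find_cons {ds : List Char} (hds : ds ≠ []) (c : Char) (t : List Char) :
    PySem.Chars.find (c :: t) ds =
      if ds.isPrefixOf (c :: t) then 0
      else if PySem.Chars.find t ds = -1 then -1 else PySem.Chars.find t ds + 1 := by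
  have h0 : PySem.Chars.find (c :: t) ds = PySem.Chars.find.go ds (c :: t) 0 := rfl
  by_cases h : ds.isPrefixOf (c :: t)
  · rw [if_pos h, h0]; simp [PySem.Chars.find.go, h]
  · rw [if_neg h, h0]
    have hstep : PySem.Chars.find.go ds (c :: t) 0 = PySem.Chars.find.go ds t 1 := by
      simp [PySem.Chars.find.go, h]
    rw [hstep, fgo_shift hds t 1]
    norm_num

def mapHead (f : List Char → List Char) : List (List Char) → List (List Char)
  | [] => []
  | a :: t => f a :: t

lemma sgo_nil (ds : List Char) (fuel : Nat) (cur : List Char) (acc : List (List Char)) :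
    PySem.Chars.splitOn.go ds (fuel + 1) [] cur acc = (cur.reverse :: acc).reverse := rfl

lemma sgo_cons (ds : List Char) (fuel : Nat) (c : Char) (rest cur : List Char)
    (acc : List (List Char)) :
    PySem.Chars.splitOn.go ds (fuel + 1) (c :: rest) cur acc =
      if ds.isPrefixOf (c :: rest) then
        PySem.Chars.splitOn.go ds fuel ((c :: rest).drop ds.length) [] (cur.reverse :: acc)
      else PySem.Chars.splitOn.go ds fuel rest (c :: cur) acc := rfl

lemma splitOnGo_eq {ds : List Char} (hds : ds ≠ []) :
    ∀ fuel l (cur : List Char) (acc : List (List Char)), l.length < fuel →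
      PySem.Chars.splitOn.go ds fuel l cur acc =
        acc.reverse ++ mapHead (fun x => cur.reverse ++ x) (splitF ds l) := by
  have hm : 0 < ds.length := List.length_pos_of_ne_nil hds
  intro fuel
  induction fuel with
  | zero => intro l cur acc h; omega
  | succ f ih =>
    intro l cur acc h
    cases l with
    | nil =>
      rw [sgo_nil]
      rw [splitF_eq hds, if_pos (find_nil_of_ne hds)]
      simp [mapHead]
    | cons c rest =>
      rw [sgo_cons]
      by_cases hpre : ds.isPrefixOf (c :: rest)
      · rw [if_pos hpre]
        have hlt : ((c :: rest).drop ds.length).length < f := by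
          simp only [List.length_drop, List.length_cons] at h ⊢
          omega
        rw [ih _ _ _ hlt]
        have hf0 : PySem.Chars.find (c :: rest) ds = 0 := by
          rw [find_cons hds, if_pos hpre]
        conv_rhs => rw [splitF_eq hds (c :: rest)]
        rw [hf0]
        rw [if_neg (by norm_num : ¬ ((0 : Int) = -1))]
        cases hsp : splitF ds ((c :: rest).drop ((0 : Int).toNat + ds.length)) with
        | nil => exact absurd hsp (splitF_ne_nil _ _)
        | cons a r =>
          have hsp' : splitF ds ((c :: rest).drop ds.length) = a :: r := by
            simpa using hsp
          rw [hsp']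
          simp [mapHead]
      · rw [if_neg hpre]
        have hlt : rest.length < f := by
          simp only [List.length_cons] at h
          omega
        rw [ih _ _ _ hlt]
        have hfc := find_cons hds c rest
        rw [if_neg hpre] at hfc
        by_cases hft : PySem.Chars.find rest ds = -1
        · rw [if_pos hft] at hfc
          rw [splitF_eq hds (c :: rest), if_pos hfc, splitF_eq hds rest, if_pos hft]
          simp [mapHead]
        · rw [if_neg hft] at hfc
          have hq0 : 0 ≤ PySem.Chars.find rest ds := find_nonneg_of_ne hft
          rw [splitF_eq hds (c :: rest), hfc]
          rw [if_neg (by omega : ¬ (PySem.Chars.find rest ds + 1 = -1))]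
          rw [splitF_eq hds rest, if_neg hft]
          have ht1 : (PySem.Chars.find rest ds + 1).toNat
              = (PySem.Chars.find rest ds).toNat + 1 := by omega
          rw [ht1, List.take_succ_cons]
          have ht2 : (PySem.Chars.find rest ds).toNat + 1 + ds.length
              = ((PySem.Chars.find rest ds).toNat + ds.length) + 1 := by omega
          rw [ht2, List.drop_succ_cons]
          simp [mapHead]

lemma splitOn_eq_splitF {ds : List Char} (hds : ds ≠ []) (l : List Char) :
    PySem.Chars.splitOn l ds = splitF ds l := by
  have h1 : PySem.Chars.splitOn l ds = PySem.Chars.splitOn.go ds (l.length + 1) l [] [] := rfl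
  rw [h1, splitOnGo_eq hds _ _ _ _ (by omega)]
  cases hsp : splitF ds l with
  | nil => exact absurd hsp (splitF_ne_nil _ _)
  | cons a r => simp [mapHead]

-- empty delimiter: the positive loop returns the whole text
lemma taPosLoop_nil (cs : List Char) :
    ∀ fuel, taPosLoop cs [] (fuel + 1) 0 = cs := by
  intro fuel
  induction fuel with
  | zero =>
    rw [taPosLoop_succ, PySem.Chars.findFrom_zero, PySem.Chars.find_nil]
    rw [if_neg (by norm_num : ¬ ((0 : Int) = -1)), if_pos rfl]
    rw [PySem.Chars.slice_eq_listSlice]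
    norm_num
  | succ g ih =>
    rw [taPosLoop_succ, PySem.Chars.findFrom_zero, PySem.Chars.find_nil]
    rw [if_neg (by norm_num : ¬ ((0 : Int) = -1)), if_neg (Nat.succ_ne_zero g)]
    simpa using ih

-- empty delimiter: the negative loop returns the empty tail
lemma taNegLoop_nil (cs : List Char) :
    ∀ fuel, taNegLoop cs [] (fuel + 1) (cs.length : Int) = [] := by
  have hrf : PySem.Chars.rfindFrom cs [] 0 (some (cs.length : Int)) = (cs.length : Int) := by
    rw [rfindFrom_zero_some (Int.natCast_nonneg _) (le_refl _)]
    simp [rfind_nil]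
  intro fuel
  induction fuel with
  | zero =>
    rw [taNegLoop_succ, hrf]
    rw [if_neg (by omega : ¬ ((cs.length : Int) = -1)), if_pos rfl]
    rw [PySem.Chars.slice_eq_listSlice, PySem.List.slice_from _ (by omega)]
    simp
  | succ g ih =>
    rw [taNegLoop_succ, hrf, if_neg (by omega : ¬ ((cs.length : Int) = -1)),
      if_neg (Nat.succ_ne_zero g)]
    exact ih

-- ===== VERDICT (by name: the statement is the Claim_ definition above) =====
theorem text_after_spec : Claim_equal_text_after := by
  intro text delimiter n hdom hpre
  obtain ⟨hn0, hrest⟩ := hpre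
  show text_after text delimiter n = text_after_alt text delimiter n
  by_cases hd : delimiter = ""
  · subst hd
    have hnil : ("" : String).toList = [] := rfl
    simp only [text_after, text_after_alt, if_neg hn0, hnil]
    by_cases hpos : 0 < n
    · rw [if_pos hpos, if_pos hpos]
      obtain ⟨f, hf⟩ : ∃ f, n.toNat = f + 1 := ⟨n.toNat - 1, by omega⟩
      rw [hf, taPosLoop_nil, String.ofList_toList]
      simp
    · rw [if_neg hpos, if_neg hpos]
      obtain ⟨f, hf⟩ : ∃ f, n.natAbs = f + 1 := ⟨n.natAbs - 1, by omega⟩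
      rw [hf, taNegLoop_nil]
      simp
  · have hds : delimiter.toList ≠ [] := fun h => hd (String.toList_eq_nil_iff.mp h)
    rcases hrest with hd' | hcnt
    · exact absurd hd' hd
    by_cases hpos : 0 < n
    · rw [if_pos hpos] at hcnt
      obtain ⟨f, hf⟩ : ∃ f, n.toNat = f + 1 := ⟨n.toNat - 1, by omega⟩
      have hn : n = (((f + 1 : Nat)) : Int) := by omega
      have hcnt' : f + 2 ≤ (splitF delimiter.toList text.toList).length := by
        rw [← splitOn_eq_splitF hds]
        omega
      simp only [text_after, if_neg hn0, if_pos hpos, hf]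
      rw [taPosLoop_eq hds f 0 (le_refl 0) (by simp)]
      simp only [Int.toNat_zero, List.drop_zero]
      rw [if_pos hcnt']
      -- B side
      have hsp : PySem.Str.split? text delimiter =
          some ((PySem.Chars.splitOn text.toList delimiter.toList).map String.ofList) := by
        simp [PySem.Str.split?, PySem.Chars.split?, hds]
      simp only [text_after_alt, if_neg hn0, if_neg hd, if_pos hpos, hsp]
      rw [if_neg (by simp only [List.length_map]; rw [← splitOn_eq_splitF hds] at hcnt'; omega)]
      rw [PySem.List.slice_from _ (by omega)]
      rw [hf, ← List.map_drop]
      simp only [PySem.Str.join, List.map_map]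
      rw [splitOn_eq_splitF hds]
      congr 1
      simp [Function.comp_def, String.toList_ofList]
    · rw [if_neg hpos] at hcnt
      obtain ⟨f, hf⟩ : ∃ f, n.natAbs = f + 1 := ⟨n.natAbs - 1, by omega⟩
      have hdrv : delimiter.toList.reverse ≠ [] := by simp [hds]
      have hcnt' : f + 2 ≤ (splitF delimiter.toList.reverse text.toList.reverse).length := by
        rw [← splitOn_eq_splitF hdrv]
        omega
      simp only [text_after, if_neg hn0, if_neg hpos, hf]
      have hneg := taNegLoop_eq (cs := text.toList) hds f 0 (Nat.zero_le _)
      simp only [Nat.cast_zero, sub_zero, List.drop_zero, List.take_zero,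
        List.nil_append] at hneg
      rw [hneg, if_pos hcnt']
      -- B side
      have hrev : (String.ofList text.toList.reverse).toList = text.toList.reverse :=
        String.toList_ofList
      have hrevd : (String.ofList delimiter.toList.reverse).toList =
          delimiter.toList.reverse := String.toList_ofList
      have hsp : PySem.Str.split? (String.ofList text.toList.reverse)
          (String.ofList delimiter.toList.reverse) =
          some ((PySem.Chars.splitOn text.toList.reverse delimiter.toList.reverse).map
            String.ofList) := by
        simp [PySem.Str.split?, PySem.Chars.split?, hrev, hrevd, hd]
      simp only [text_after_alt, if_neg hn0, if_neg hd, if_neg hpos, hsp]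
      rw [if_neg (by
        simp only [List.length_map]
        rw [← splitOn_eq_splitF hdrv] at hcnt'
        omega)]
      rw [PySem.List.slice_to _ (by omega)]
      have hkn : (-n).toNat = f + 1 := by omega
      rw [hkn, ← List.map_take]
      simp only [PySem.Str.join, List.map_map]
      rw [splitOn_eq_splitF hdrv]
      have hid : List.map (String.toList ∘ String.ofList)
          (List.take (f + 1) (splitF delimiter.toList.reverse text.toList.reverse))
          = List.take (f + 1) (splitF delimiter.toList.reverse text.toList.reverse) := by
        simp [Function.comp_def, String.toList_ofList]
      rw [hid, String.toList_ofList, hrevd]
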